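-- pv_equiv track=rewrite | github.com/definitelynotrussellkirk-bit/binarySKILL | generators/subsets.py | validate_subset
-- ===== SOURCE A (Python) =====
-- from typing import List, Dict, Any, Set
--
-- def validate_subset(subset: List[int], n: int, k: int) -> bool:
--     """
--     Validate that a list is a valid k-element subset of [n].
--
--     Args:
--         subset: List of integers
--         n: Universe size
--         k: Expected subset size
--
--     Returns:
--         True if subset is valid (correct size, all in range, no duplicates)
--
--     Examples:
--         >>> validate_subset([1, 3, 5], 10, 3)
--         True
--         >>> validate_subset([1, 3, 5], 10, 4)
--         False
--         >>> validate_subset([1, 1, 3], 10, 3)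
--         False
--     """
--     if len(subset) != k:
--         return False
--     if len(set(subset)) != k:
--         return False  # Duplicates
--     if any(x < 0 or x >= n for x in subset):
--         return False  # Out of range
--     return True
-- ===== SOURCE B (Python) =====
-- def validate_subset(subset, n, k):
--     if len(subset) != k:
--         return False
--     if not subset:
--         return True
--     s = sorted(subset)
--     if s[0] < 0 or s[-1] >= n:
--         return False
--     return all(a < b for a, b in zip(s, s[1:]))
-- ===== Notes on version B (the rewrite author's own statement) =====
-- stated objective: alternative
-- what changed: Replaces A's hash-set cardinality test and full range scan with a sort-based algorithm: sort the list, check only the two endpoints for range, and detect duplicates by scanning adjacent pairs for strict increase.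
import Mathlib
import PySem

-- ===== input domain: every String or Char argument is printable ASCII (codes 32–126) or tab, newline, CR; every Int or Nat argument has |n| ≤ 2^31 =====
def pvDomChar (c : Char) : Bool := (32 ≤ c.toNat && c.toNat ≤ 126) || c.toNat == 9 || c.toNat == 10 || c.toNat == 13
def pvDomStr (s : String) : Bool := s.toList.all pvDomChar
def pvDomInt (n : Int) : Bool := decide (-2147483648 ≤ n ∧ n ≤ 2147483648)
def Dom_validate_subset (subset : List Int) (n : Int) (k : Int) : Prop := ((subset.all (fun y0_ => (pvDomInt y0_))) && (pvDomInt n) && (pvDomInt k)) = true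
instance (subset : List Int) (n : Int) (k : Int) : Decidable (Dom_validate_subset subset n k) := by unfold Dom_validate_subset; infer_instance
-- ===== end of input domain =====

-- B replaces A's hash-set cardinality test and full range scan with sort + endpoint range check + adjacent-pair strict-increase duplicate scan; return value proved equal on all inputs.


-- ===== PORT A =====
def validate_subset (subset : List Int) (n : Int) (k : Int) : Bool :=
  if (subset.length : Int) ≠ k then false
  else if ((PySem.Set.ofList subset).length : Int) ≠ k then false
  else if subset.any (fun x => decide (x < 0) || decide (n ≤ x)) then false
  else true

-- ===== PORT B =====
def validate_subset_alt (subset : List Int) (n : Int) (k : Int) : Bool :=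
  if (subset.length : Int) ≠ k then false
  else if subset.isEmpty then true
  else
    let s := PySem.List.sorted subset (fun x => x) false
    match PySem.List.pyGet? s 0, PySem.List.pyGet? s (-1) with
    | some a, some b =>
      if a < 0 ∨ n ≤ b then false
      else (s.zip (s.drop 1)).all (fun p => decide (p.1 < p.2))
    | _, _ => false  -- unreachable: s is nonempty, so s[0] and s[-1] exist

-- ===== PRECONDITION & SPEC =====
def Spec_validate_subset (subset : List Int) (n : Int) (k : Int) (out : Bool) : Prop := out = validate_subset_alt subset n k
instance (subset : List Int) (n : Int) (k : Int) (out : Bool) : Decidable (Spec_validate_subset subset n k out) := by unfold Spec_validate_subset; infer_instance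

-- ===== CLAIM =====
def Claim_equal_validate_subset : Prop := ∀ (subset : List Int) (n : Int) (k : Int), Dom_validate_subset subset n k → Spec_validate_subset subset n k (validate_subset subset n k)

-- ===== LEMMAS AND PROOFS =====

-- |set(xs)| = |xs| exactly when xs has no duplicates
theorem ofList_length_eq_iff (xs : List Int) :
    (PySem.Set.ofList xs).length = xs.length ↔ xs.Nodup := by
  induction xs with
  | nil => simp
  | cons x xs ih =>
    rw [PySem.Set.ofList_cons]
    simp only [List.length_cons, List.nodup_cons]
    by_cases hx : x ∈ xs
    · have hx' : x ∈ PySem.Set.ofList xs := (PySem.Set.mem_ofList xs x).mpr hx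
      have hlt : ((PySem.Set.ofList xs).discard x).length < (PySem.Set.ofList xs).length := by
        unfold PySem.Set.discard
        exact List.length_filter_lt_length_iff_exists.mpr ⟨x, hx', by simp⟩
      have hle := PySem.Set.length_ofList_le xs
      constructor
      · intro h; omega
      · rintro ⟨habs, -⟩; exact absurd hx habs
    · have hx' : x ∉ PySem.Set.ofList xs := fun h => hx ((PySem.Set.mem_ofList xs x).mp h)
      have hd : (PySem.Set.ofList xs).discard x = PySem.Set.ofList xs := by
        unfold PySem.Set.discard
        apply List.filter_eq_self.mpr
        intro y hy
        simpa using fun he : y = x => hx' (he ▸ hy)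
      rw [hd]
      constructor
      · intro h; exact ⟨hx, ih.mp (by omega)⟩
      · rintro ⟨-, hnd⟩; rw [ih.mpr hnd]

-- the adjacent-pair scan of B is the IsChain (<) predicate
theorem zipAdj_all_iff (s : List Int) :
    (s.zip (s.drop 1)).all (fun p => decide (p.1 < p.2)) = true ↔ List.IsChain (· < ·) s := by
  induction s with
  | nil => simp
  | cons a t ih =>
    cases t with
    | nil => simp
    | cons b u =>
      rw [List.isChain_cons_cons, ← ih]
      simp

-- sorted order bounds every member by the last element
theorem mem_le_getLast (s : List Int) (h : s.Pairwise (· ≤ ·)) :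
    ∀ x ∈ s, ∀ hne : s ≠ [], x ≤ s.getLast hne := by
  induction s with
  | nil => intro x hx; cases hx
  | cons a t ih =>
    rcases List.pairwise_cons.mp h with ⟨ha, ht⟩
    intro x hx hne
    cases t with
    | nil => simp at hx; simp [hx]
    | cons b u =>
      rw [List.getLast_cons (by simp)]
      rcases List.mem_cons.mp hx with rfl | hx'
      · exact le_trans (ha b (by simp)) (ih ht b (by simp) (by simp))
      · exact ih ht x hx' (by simp)

-- A's truth characterisation
theorem A_iff (subset : List Int) (n k : Int) :
    validate_subset subset n k = true ↔
      (subset.length : Int) = k ∧ subset.Nodup ∧ ∀ x ∈ subset, 0 ≤ x ∧ x < n := by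
  unfold validate_subset
  by_cases hk : (subset.length : Int) = k
  · rw [if_neg (by omega)]
    by_cases hnd : subset.Nodup
    · have h1 : ((PySem.Set.ofList subset).length : Int) = k := by
        rw [← hk]; exact_mod_cast (ofList_length_eq_iff subset).mpr hnd
      rw [if_neg (by omega)]
      by_cases hr : ∀ x ∈ subset, 0 ≤ x ∧ x < n
      · have h2 : subset.any (fun x => decide (x < 0) || decide (n ≤ x)) = false := by
          simp only [List.any_eq_false, Bool.or_eq_true, decide_eq_true_eq, not_or]
          intro x hx; rcases hr x hx with ⟨a, b⟩; omega
        rw [if_neg (by simp [h2])]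
        simpa using ⟨hk, hnd, hr⟩
      · push Not at hr
        rcases hr with ⟨x, hx, hbad⟩
        have h2 : subset.any (fun x => decide (x < 0) || decide (n ≤ x)) = true :=
          List.any_eq_true.mpr ⟨x, hx, by simp; omega⟩
        rw [if_pos h2]
        constructor
        · intro h; cases h
        · rintro ⟨-, -, hall⟩; rcases hall x hx with ⟨a, b⟩; omega
    · have h1 : ((PySem.Set.ofList subset).length : Int) ≠ k := by
        rw [← hk]; intro h
        exact hnd ((ofList_length_eq_iff subset).mp (by exact_mod_cast h))
      rw [if_pos h1]
      constructor
      · intro h; cases h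
      · rintro ⟨-, h, -⟩; exact absurd h hnd
  · rw [if_pos hk]
    constructor
    · intro h; cases h
    · rintro ⟨h, -⟩; exact absurd h hk

-- B's truth characterisation
theorem B_iff (subset : List Int) (n k : Int) :
    validate_subset_alt subset n k = true ↔
      (subset.length : Int) = k ∧ subset.Nodup ∧ ∀ x ∈ subset, 0 ≤ x ∧ x < n := by
  unfold validate_subset_alt
  by_cases hk : (subset.length : Int) = k
  · rw [if_neg (by omega)]
    by_cases hemp : subset = []
    · subst hemp; simp_all
    · rw [if_neg (by simpa [List.isEmpty_iff] using hemp)]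
      have hsne : PySem.List.sorted subset (fun x => x) false ≠ [] := by
        rw [Ne, PySem.List.sorted_eq_nil_iff]; exact hemp
      obtain ⟨m, t, hs⟩ := List.exists_cons_of_ne_nil hsne
      have hperm : (PySem.List.sorted subset (fun x => x) false).Perm subset :=
        PySem.List.sorted_perm subset (fun x => x) false
      have hpw : (PySem.List.sorted subset (fun x => x) false).Pairwise
          (fun a b => (fun x => x) a ≤ (fun x => x) b) :=
        PySem.List.sorted_pairwise subset (fun x => x)
      have hhead_le : ∀ y ∈ subset, m ≤ y :=
        PySem.List.key_head_sorted_le subset (fun x => x) hs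
      rw [hs] at hperm hpw
      show (match PySem.List.pyGet? (PySem.List.sorted subset (fun x => x) false) 0,
              PySem.List.pyGet? (PySem.List.sorted subset (fun x => x) false) (-1) with
            | some a, some b => if a < 0 ∨ n ≤ b then false
                else ((PySem.List.sorted subset (fun x => x) false).zip
                  ((PySem.List.sorted subset (fun x => x) false).drop 1)).all
                  (fun p => decide (p.1 < p.2))
            | _, _ => false) = true ↔ _
      rw [hs, PySem.List.pyGet?_zero_cons, PySem.List.pyGet?_neg_one,
          List.getLast?_eq_some_getLast (by simp)]
      have hmem : ∀ x, x ∈ m :: t ↔ x ∈ subset := fun x => hperm.mem_iff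
      have hlast_mem : (m :: t).getLast (by simp) ∈ subset := (hmem _).mp (List.getLast_mem _)
      have hm_mem : m ∈ subset := (hmem m).mp (by simp)
      have hpw' : (m :: t).Pairwise (· ≤ ·) := hpw
      show (if m < 0 ∨ n ≤ (m :: t).getLast (by simp) then false
          else ((m :: t).zip ((m :: t).drop 1)).all (fun p => decide (p.1 < p.2))) = true ↔ _
      by_cases hrange : m < 0 ∨ n ≤ (m :: t).getLast (by simp)
      · rw [if_pos hrange]
        constructor
        · intro h; cases h
        · rintro ⟨-, -, hall⟩
          rcases hrange with h | h
          · rcases hall m hm_mem with ⟨a, -⟩; omega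
          · rcases hall _ hlast_mem with ⟨-, b⟩; omega
      · rw [if_neg hrange]
        push Not at hrange
        rw [zipAdj_all_iff, List.isChain_iff_pairwise]
        constructor
        · intro hlt
          refine ⟨hk, ?_, ?_⟩
          · exact (hperm.nodup_iff).mp (hlt.imp fun h => ne_of_lt h)
          · intro x hx
            have hxs : x ∈ m :: t := (hmem x).mpr hx
            exact ⟨le_trans hrange.1 (hhead_le x hx),
              lt_of_le_of_lt (mem_le_getLast (m :: t) hpw' x hxs (by simp)) hrange.2⟩
        · rintro ⟨-, hnd, -⟩
          have hsnd : (m :: t).Nodup := (hperm.nodup_iff).mpr hnd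
          exact (hpw'.and hsnd).imp fun ⟨hle, hne⟩ => lt_of_le_of_ne hle hne
  · rw [if_pos hk]
    constructor
    · intro h; cases h
    · rintro ⟨h, -⟩; exact absurd h hk

-- ===== VERDICT =====
theorem validate_subset_spec : Claim_equal_validate_subset := by
  intro subset n k _
  unfold Spec_validate_subset
  cases hB : validate_subset_alt subset n k with
  | true => exact (A_iff subset n k).mpr ((B_iff subset n k).mp hB)
  | false =>
    cases hA : validate_subset subset n k with
    | false => rfl
    | true => rw [← hB, (B_iff subset n k).mpr ((A_iff subset n k).mp hA)]
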